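-- pv_equiv track=rewrite | github.com/GregSQT/40k | engine/hex_utils.py | dilate_hex_set_unbounded
-- ===== SOURCE A (Python) =====
-- from typing import Any, Dict, List, Optional, Set, Tuple
--
-- _NEIGHBORS_EVEN_COL: Tuple[Tuple[int, int], ...] = (
--     (0, -1),    # N
--     (1, -1),    # NE
--     (1, 0),     # SE
--     (0, 1),     # S
--     (-1, 0),    # SW
--     (-1, -1),   # NW
-- )
--
-- _NEIGHBORS_ODD_COL: Tuple[Tuple[int, int], ...] = (
--     (0, -1),    # N
--     (1, 0),     # NE
--     (1, 1),     # SE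
--     (0, 1),     # S
--     (-1, 1),    # SW
--     (-1, 0),    # NW
-- )
--
-- def dilate_hex_set_unbounded(
--     fp: Set[Tuple[int, int]],
--     radius: int,
-- ) -> Set[Tuple[int, int]]:
--     """All hexes on the infinite odd-q grid within ``radius`` steps of ``fp`` (inclusive).
--
--     Uses the same 6-neighbor expansion as ``min_distance_between_sets`` (unbounded BFS).
--     For disjoint non-empty footprints A and B: ``min_distance_between_sets(A, B) <= radius``
--     iff ``A & dilate_hex_set_unbounded(B, radius)`` is non-empty (and same symmetrically).
--
--     Args:
--         fp: Non-empty set of (col, row) cells; empty input returns empty set.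
--         radius: Number of expansion layers (must be >= 0).
--
--     Raises:
--         ValueError: if ``radius`` is negative.
--     """
--     if radius < 0:
--         raise ValueError("radius must be non-negative")
--     if not fp:
--         return set()
--     result: Set[Tuple[int, int]] = set(fp)
--     frontier = list(fp)
--     for _ in range(radius):
--         next_frontier: List[Tuple[int, int]] = []
--         for c, r in frontier:
--             offsets = _NEIGHBORS_ODD_COL if (c & 1) else _NEIGHBORS_EVEN_COL
--             for dc, dr in offsets:
--                 nc, nr = c + dc, r + dr
--                 npos = (nc, nr)
--                 if npos not in result:
--                     result.add(npos)
--                     next_frontier.append(npos)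
--         frontier = next_frontier
--         if not frontier:
--             break
--     return result
-- ===== SOURCE B (Python) =====
-- from typing import List, Set, Tuple
--
-- _NEIGHBORS_EVEN_COL: Tuple[Tuple[int, int], ...] = (
--     (0, -1), (1, -1), (1, 0), (0, 1), (-1, 0), (-1, -1),
-- )
--
-- _NEIGHBORS_ODD_COL: Tuple[Tuple[int, int], ...] = (
--     (0, -1), (1, 0), (1, 1), (0, 1), (-1, 1), (-1, 0),
-- )
--
-- def dilate_hex_set_unbounded(
--     fp: Set[Tuple[int, int]],
--     radius: int,
-- ) -> Set[Tuple[int, int]]: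
--     """Cursor-queue expansion: one growing array of (cell, remaining budget)
--     scanned by an index; no layer lists, no frontier rebuild, no break."""
--     if radius < 0:
--         raise ValueError("radius must be non-negative")
--     if not fp:
--         return set()
--     seen: Set[Tuple[int, int]] = set(fp)
--     queue: List[Tuple[Tuple[int, int], int]] = [(cell, radius) for cell in fp]
--     i = 0
--     while i < len(queue):
--         (c, r), rem = queue[i]
--         i += 1
--         if rem == 0:
--             continue
--         for dc, dr in _NEIGHBORS_ODD_COL if c & 1 else _NEIGHBORS_EVEN_COL:
--             np = (c + dc, r + dr)
--             if np not in seen: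
--                 seen.add(np)
--                 queue.append((np, rem - 1))
--     return seen
-- ===== Notes on version B (the rewrite author's own statement) =====
-- stated objective: alternative
-- what changed: Replaces A's layered expansion - 'for _ in range(radius)' rebuilding a fresh frontier list each layer with an empty-frontier break - by a single growing queue of (cell, remaining-budget) pairs scanned once by an index cursor: each popped cell with budget left appends its unseen neighbours with budget-1, so layer lists, the layer counter loop and the break all disappear.
import Mathlib
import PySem

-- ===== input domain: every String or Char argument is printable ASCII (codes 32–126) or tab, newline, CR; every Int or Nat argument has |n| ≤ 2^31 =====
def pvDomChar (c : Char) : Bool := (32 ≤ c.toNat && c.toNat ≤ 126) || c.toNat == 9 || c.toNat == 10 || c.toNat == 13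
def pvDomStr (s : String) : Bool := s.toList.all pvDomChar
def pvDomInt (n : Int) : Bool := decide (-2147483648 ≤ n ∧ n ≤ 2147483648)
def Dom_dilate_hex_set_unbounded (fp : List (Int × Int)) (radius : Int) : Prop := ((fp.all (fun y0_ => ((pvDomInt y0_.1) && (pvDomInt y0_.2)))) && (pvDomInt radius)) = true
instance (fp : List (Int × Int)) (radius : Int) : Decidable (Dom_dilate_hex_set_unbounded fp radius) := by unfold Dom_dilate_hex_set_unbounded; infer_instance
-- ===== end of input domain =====

-- B replaces A's layered BFS (frontier list rebuilt per layer, 'for _ in range(radius)', frontier-empty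
-- break) by a single cursor-scanned growing queue of (cell, remaining-budget) pairs; alternative
-- decomposition, same cost.

-- ===== PORT A =====
-- module-level neighbour tables (shared by both Pythons)
def pvNbrsEven : List (Int × Int) := [(0,-1),(1,-1),(1,0),(0,1),(-1,0),(-1,-1)]
def pvNbrsOdd  : List (Int × Int) := [(0,-1),(1,0),(1,1),(0,1),(-1,1),(-1,0)]
-- 'c & 1' truthiness on Python ints = c is odd
def pvOffsets (c : Int) : List (Int × Int) := if c % 2 ≠ 0 then pvNbrsOdd else pvNbrsEven

-- one iteration of A's for-loop body: scan the frontier, growing (result, next_frontier)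
def pvLayerA (res fr : List (Int × Int)) : List (Int × Int) × List (Int × Int) :=
  fr.foldl (fun a cell =>
    (pvOffsets cell.1).foldl (fun a d =>
      let np := (cell.1 + d.1, cell.2 + d.2)
      if np ∈ a.1 then a else (a.1 ++ [np], a.2 ++ [np])) a)
    (res, [])

-- 'for _ in range(radius): … ; if not frontier: break'
def pvLoopA : Nat → List (Int × Int) → List (Int × Int) → List (Int × Int)
  | 0, res, _ => res
  | n+1, res, fr =>
    let st := pvLayerA res fr
    if st.2 = [] then st.1 else pvLoopA n st.1 st.2

def dilate_hex_set_unbounded (fp : List (Int × Int)) (radius : Int) : List (Int × Int) :=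
  if radius < 0 then []          -- ValueError; excluded by Pre_
  else if fp = [] then []
  else
    let init := PySem.Set.ofList fp
    pvLoopA radius.toNat init init

-- ===== PORT B =====
-- the inner for-loop of B: expand one queue cell, growing (seen, appended-queue-items)
def pvExpand (seen : List (Int × Int)) (c : Int × Int) : List (Int × Int) × List (Int × Int) :=
  (pvOffsets c.1).foldl (fun a d =>
    let np := (c.1 + d.1, c.2 + d.2)
    if np ∈ a.1 then a else (a.1 ++ [np], a.2 ++ [np])) (seen, [])

-- termination helpers for the cursor loop (cited by the port's decreasing_by)
def pvQMeasure (q : List ((Int × Int) × Nat)) : Nat := (q.map (fun x => 7 ^ x.2)).sum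

lemma pvSumMapConst {α : Type} (l : List α) (k : Nat) : (l.map (fun _ => k)).sum = l.length * k := by
  induction l with
  | nil => simp
  | cons p ps ih => simp [ih, Nat.succ_mul, Nat.add_comm]

lemma pvFoldSndLen {γ δ : Type} (f : List γ × List γ → δ → List γ × List γ)
    (hf : ∀ a d, ((f a d).2).length ≤ a.2.length + 1) (ds : List δ) :
    ∀ st : List γ × List γ, ((ds.foldl f st).2).length ≤ st.2.length + ds.length := by
  induction ds with
  | nil => intro st; simp
  | cons d ds ih =>
    intro st
    simp only [List.foldl_cons, List.length_cons]
    have h1 := ih (f st d)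
    have h2 := hf st d
    omega

lemma pvExpand_snd_len (seen : List (Int × Int)) (c : Int × Int) :
    (pvExpand seen c).2.length ≤ 6 := by
  have h := pvFoldSndLen (fun a d =>
      let np := (c.1 + d.1, c.2 + d.2)
      if np ∈ a.1 then a else (a.1 ++ [np], a.2 ++ [np]))
    (by
      intro a d
      dsimp only
      split
      · omega
      · simp)
    (pvOffsets c.1) (seen, [])
  have hlen : (pvOffsets c.1).length = 6 := by unfold pvOffsets; split <;> rfl
  simpa [pvExpand, hlen] using h

lemma pvQStep_lt (cell : Int × Int) (rem : Nat) (rest news : List ((Int × Int) × Nat))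
    (hlen : news.length ≤ 6) (hrem : ∀ x ∈ news, x.2 = rem) :
    pvQMeasure (rest ++ news) < pvQMeasure ((cell, rem + 1) :: rest) := by
  unfold pvQMeasure
  simp only [List.map_append, List.sum_append, List.map_cons, List.sum_cons]
  have h1 : (news.map (fun x => 7 ^ x.2)).sum = news.length * 7 ^ rem := by
    rw [show news.map (fun x => 7 ^ x.2) = news.map (fun _ => 7 ^ rem) from
      List.map_congr_left (fun x hx => by rw [hrem x hx])]
    exact pvSumMapConst news _
  have h2 : news.length * 7 ^ rem ≤ 6 * 7 ^ rem := Nat.mul_le_mul_right _ hlen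
  have h3 : 0 < 7 ^ rem := Nat.pow_pos (by norm_num)
  have h4 : 7 ^ (rem + 1) = 7 * 7 ^ rem := by ring
  omega

-- 'while i < len(queue): (c,r),rem = queue[i]; i += 1; …'  — cursor scan of the growing queue,
-- modelled as recursion on the unscanned part (appends go to its end)
def pvQLoop : List ((Int × Int) × Nat) → List (Int × Int) → List (Int × Int)
  | [], seen => seen
  | (_, 0) :: rest, seen => pvQLoop rest seen
  | (cell, rem+1) :: rest, seen =>
      let st := pvExpand seen cell
      pvQLoop (rest ++ st.2.map (fun p => (p, rem))) st.1
termination_by q _ => pvQMeasure q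
decreasing_by
· simp [pvQMeasure]
· exact pvQStep_lt cell rem rest _
    (by simpa using pvExpand_snd_len seen cell)
    (by intro x hx; rcases List.mem_map.1 hx with ⟨p, _, rfl⟩; rfl)

def dilate_hex_set_unbounded_alt (fp : List (Int × Int)) (radius : Int) : List (Int × Int) :=
  if radius < 0 then []          -- ValueError; excluded by Pre_
  else if fp = [] then []
  else
    let seen := PySem.Set.ofList fp
    pvQLoop (seen.map (fun cell => (cell, radius.toNat))) seen

-- ===== PRECONDITION & SPEC =====
-- Pre_ excludes exactly radius < 0, where the Python raises ValueError.
def Pre_dilate_hex_set_unbounded (fp : List (Int × Int)) (radius : Int) : Prop := 0 ≤ radius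
instance (fp : List (Int × Int)) (radius : Int) : Decidable (Pre_dilate_hex_set_unbounded fp radius) := by unfold Pre_dilate_hex_set_unbounded; infer_instance
def pvWitness_dilate_hex_set_unbounded : (List (Int × Int)) × Int := ([(0, 0), (1, 2)], 1)

def Spec_dilate_hex_set_unbounded (fp : List (Int × Int)) (radius : Int) (out : List (Int × Int)) : Prop := out = dilate_hex_set_unbounded_alt fp radius
instance (fp : List (Int × Int)) (radius : Int) (out : List (Int × Int)) : Decidable (Spec_dilate_hex_set_unbounded fp radius out) := by unfold Spec_dilate_hex_set_unbounded; infer_instance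

-- ===== CLAIM =====
def Claim_equal_dilate_hex_set_unbounded : Prop := ∀ (fp : List (Int × Int)) (radius : Int), Dom_dilate_hex_set_unbounded fp radius → Pre_dilate_hex_set_unbounded fp radius → Spec_dilate_hex_set_unbounded fp radius (dilate_hex_set_unbounded fp radius)

-- ===== LEMMAS AND PROOFS =====

-- candidate stream of a scan over l: all generated neighbour positions, in order
def pvCands (l : List (Int × Int)) : List (Int × Int) :=
  l.flatMap (fun cell => (pvOffsets cell.1).map (fun d => (cell.1 + d.1, cell.2 + d.2)))

-- the genuinely new points a seen-set S picks up from a candidate stream, in order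
def pvNew : List (Int × Int) → List (Int × Int) → List (Int × Int)
  | [], _ => []
  | p :: ps, S => if p ∈ S then pvNew ps S else p :: pvNew ps (S ++ [p])

lemma scanA_spec (ps : List (Int × Int)) : ∀ res nf,
    ps.foldl (fun a np => if np ∈ a.1 then a else (a.1 ++ [np], a.2 ++ [np])) (res, nf)
      = (res ++ pvNew ps res, nf ++ pvNew ps res) := by
  induction ps with
  | nil => intro res nf; simp [pvNew]
  | cons p ps ih =>
    intro res nf
    by_cases h : p ∈ res
    · simp [pvNew, h, ih]
    · simp only [List.foldl_cons, pvNew, h, if_false]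
      rw [ih]
      simp [List.append_assoc]

lemma pvLayerA_spec (res fr : List (Int × Int)) :
    pvLayerA res fr = (res ++ pvNew (pvCands fr) res, pvNew (pvCands fr) res) := by
  rw [show pvLayerA res fr = (pvCands fr).foldl
      (fun a np => if np ∈ a.1 then a else (a.1 ++ [np], a.2 ++ [np])) (res, []) by
    simp only [pvLayerA, pvCands, List.foldl_flatMap, List.foldl_map]]
  rw [scanA_spec]; simp

lemma pvExpand_spec (seen : List (Int × Int)) (c : Int × Int) :
    pvExpand seen c = (seen ++ pvNew (pvCands [c]) seen, pvNew (pvCands [c]) seen) := by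
  rw [show pvExpand seen c = (pvCands [c]).foldl
      (fun a np => if np ∈ a.1 then a else (a.1 ++ [np], a.2 ++ [np])) (seen, []) by
    simp only [pvExpand, pvCands, List.flatMap_cons, List.flatMap_nil, List.append_nil,
      List.foldl_map]]
  rw [scanA_spec]; simp

lemma pvNew_append (xs ys : List (Int × Int)) : ∀ S,
    pvNew (xs ++ ys) S = pvNew xs S ++ pvNew ys (S ++ pvNew xs S) := by
  induction xs with
  | nil => intro S; simp [pvNew]
  | cons p xs ih =>
    intro S
    by_cases h : p ∈ S
    · simp [pvNew, h, ih]
    · simp only [List.cons_append, pvNew, h, if_false, ih (S ++ [p])]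
      simp [List.append_assoc]

lemma pvCands_cons (c : Int × Int) (l : List (Int × Int)) :
    pvCands (c :: l) = pvCands [c] ++ pvCands l := by
  simp [pvCands]

-- draining a queue whose items all have budget 0 returns seen unchanged
lemma pvQLoop_zeros (fr : List (Int × Int)) : ∀ seen,
    pvQLoop (fr.map (fun cell => (cell, 0))) seen = seen := by
  induction fr with
  | nil => intro seen; simp [pvQLoop]
  | cons c fr ih => intro seen; simp only [List.map_cons, pvQLoop]; exact ih seen

-- scanning the budget-(m+1) prefix of the queue = A's layer scan of that prefix
lemma pvQLoop_step (m : Nat) (fr : List (Int × Int)) : ∀ (nf res : List (Int × Int)),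
    pvQLoop (fr.map (fun cell => (cell, m+1)) ++ nf.map (fun cell => (cell, m))) res
      = pvQLoop ((nf ++ pvNew (pvCands fr) res).map (fun cell => (cell, m)))
          (res ++ pvNew (pvCands fr) res) := by
  induction fr with
  | nil => intro nf res; simp [pvCands, pvNew]
  | cons c fr ih =>
    intro nf res
    have hex := pvExpand_spec res c
    simp only [List.map_cons, List.cons_append, pvQLoop, hex]
    rw [show (fr.map (fun cell => (cell, m+1)) ++ nf.map (fun cell => (cell, m)))
          ++ (pvNew (pvCands [c]) res).map (fun p => (p, m))
        = fr.map (fun cell => (cell, m+1))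
          ++ (nf ++ pvNew (pvCands [c]) res).map (fun cell => (cell, m)) by
      simp [List.append_assoc]]
    rw [ih]
    have key : pvNew (pvCands (c :: fr)) res
        = pvNew (pvCands [c]) res ++ pvNew (pvCands fr) (res ++ pvNew (pvCands [c]) res) := by
      rw [pvCands_cons, pvNew_append]
    rw [key]
    simp [List.map_append, List.append_assoc]

lemma pvLoopA_nil (n : Nat) (res : List (Int × Int)) : pvLoopA n res [] = res := by
  cases n with
  | zero => rfl
  | succ n =>
    show (if (pvLayerA res []).2 = [] then (pvLayerA res []).1
          else pvLoopA n (pvLayerA res []).1 (pvLayerA res []).2) = res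
    rw [show pvLayerA res [] = (res, []) from rfl]
    simp

-- the core: the cursor queue at uniform budget n computes A's n-layer BFS
lemma loop_eq (n : Nat) : ∀ fr res : List (Int × Int),
    pvQLoop (fr.map (fun cell => (cell, n))) res = pvLoopA n res fr := by
  induction n with
  | zero => intro fr res; exact pvQLoop_zeros fr res
  | succ n ih =>
    intro fr res
    have h := pvQLoop_step n fr [] res
    simp only [List.map_nil, List.append_nil, List.nil_append] at h
    rw [h, ih]
    show _ = (if (pvLayerA res fr).2 = [] then (pvLayerA res fr).1
          else pvLoopA n (pvLayerA res fr).1 (pvLayerA res fr).2)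
    rw [pvLayerA_spec res fr]
    by_cases hstop : pvNew (pvCands fr) res = []
    · simp [hstop, pvLoopA_nil]
    · rw [if_neg hstop]

-- ===== VERDICT =====
theorem dilate_hex_set_unbounded_spec : Claim_equal_dilate_hex_set_unbounded := by
  intro fp radius _ hpre
  show dilate_hex_set_unbounded fp radius = dilate_hex_set_unbounded_alt fp radius
  unfold dilate_hex_set_unbounded dilate_hex_set_unbounded_alt
  have hneg : ¬ radius < 0 := not_lt.2 hpre
  rw [if_neg hneg, if_neg hneg]
  by_cases hfp : fp = []
  · rw [if_pos hfp, if_pos hfp]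
  · rw [if_neg hfp, if_neg hfp]
    exact (loop_eq radius.toNat (PySem.Set.ofList fp) (PySem.Set.ofList fp)).symm
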